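-- pv_equiv track=rewrite | github.com/CrySyS/CAN-Message-Modification-Detection | src/modules/scripts/utils.py | get_group_index_by_signal_index
-- ===== SOURCE A (Python) =====
-- def get_group_index_by_signal_index(signal_index, config):
--        signal_ids = config.get('signal_ids')
--        count = 0
--        for key in signal_ids:
--             group_len = len(signal_ids[key])
--             count += group_len
--             if count > signal_index:
--                     return key-1
-- ===== SOURCE B (Python) =====
-- def _bisect_right(a, x):
--     lo, hi = 0, len(a)
--     while lo < hi:
--         mid = (lo + hi) // 2
--         if x < a[mid]:
--             hi = mid
--         else:
--             lo = mid + 1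
--     return lo
--
-- def get_group_index_by_signal_index(signal_index, config):
--     signal_ids = config.get('signal_ids')
--     keys = list(signal_ids)
--     prefix = []
--     total = 0
--     for k in keys:
--         total += len(signal_ids[k])
--         prefix.append(total)
--     i = _bisect_right(prefix, signal_index)
--     if i == len(keys):
--         return None
--     return keys[i] - 1
-- ===== Notes on version B (the rewrite author's own statement) =====
-- stated objective: alternative
-- what changed: Replaces A's accumulate-and-compare scan with building a prefix-sum table of group lengths plus a parallel key list and locating the answer with a hand-written binary search (bisect_right).
import Mathlib
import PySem

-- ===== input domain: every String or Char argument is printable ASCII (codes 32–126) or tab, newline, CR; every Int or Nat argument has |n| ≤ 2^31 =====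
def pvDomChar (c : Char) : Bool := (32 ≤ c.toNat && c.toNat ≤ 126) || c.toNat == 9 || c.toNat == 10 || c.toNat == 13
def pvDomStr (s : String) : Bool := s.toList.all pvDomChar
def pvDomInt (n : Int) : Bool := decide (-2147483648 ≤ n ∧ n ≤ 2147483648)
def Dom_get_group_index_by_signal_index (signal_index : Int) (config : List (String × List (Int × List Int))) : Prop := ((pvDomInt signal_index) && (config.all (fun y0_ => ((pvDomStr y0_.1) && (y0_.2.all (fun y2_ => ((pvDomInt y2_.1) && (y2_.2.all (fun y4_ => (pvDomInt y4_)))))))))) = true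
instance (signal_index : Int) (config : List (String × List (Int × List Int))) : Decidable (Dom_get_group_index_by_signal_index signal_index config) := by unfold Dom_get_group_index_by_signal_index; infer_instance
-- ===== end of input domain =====

-- B replaces A's accumulate-and-compare scan by a prefix-sum table of group lengths,
-- a parallel key list, and a binary search (bisect_right); alternative decomposition, same cost class.

-- ===== PORT A =====
-- the for-loop of A: iterate over the keys, accumulate the group lengths, return key-1 on first excess
def pvGoA (signal_ids : List (Int × List Int)) (signal_index : Int) : Int → List (Int × List Int) → Option Int
  | _, [] => none
  | count, (key, _) :: rest =>
    let group_len : Int := ((signal_ids.lookup key).getD []).length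
    let count := count + group_len
    if count > signal_index then some (key - 1) else pvGoA signal_ids signal_index count rest

def get_group_index_by_signal_index (signal_index : Int) (config : List (String × List (Int × List Int))) : Option Int :=
  -- config.get('signal_ids'); when the key is absent Python A raises (excluded by Pre_), the port uses []
  let signal_ids := (config.lookup "signal_ids").getD []
  pvGoA signal_ids signal_index 0 signal_ids

-- ===== PORT B =====
-- _bisect_right(a, x) from Source B, exact while-loop transliteration
def pvBisectRight (a : List Int) (x : Int) (lo hi : Nat) : Nat :=
  if lo < hi then
    let mid := (lo + hi) / 2
    if x < a.getD mid 0 then pvBisectRight a x lo mid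
    else pvBisectRight a x (mid + 1) hi
  else lo
termination_by hi - lo
decreasing_by all_goals omega

-- the prefix-building loop of Source B: running total, appending each cumulative sum
def pvPrefix (total : Int) : List Int → List Int
  | [] => []
  | n :: ns => (total + n) :: pvPrefix (total + n) ns

def get_group_index_by_signal_index_alt (signal_index : Int) (config : List (String × List (Int × List Int))) : Option Int :=
  let signal_ids := (config.lookup "signal_ids").getD []
  let keys := signal_ids.map Prod.fst
  let pre := pvPrefix 0 (keys.map (fun k => (((signal_ids.lookup k).getD []).length : Int)))
  let i := pvBisectRight pre signal_index 0 pre.length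
  if i = keys.length then none else some (keys.getD i 0 - 1)

-- ===== PRECONDITION & SPEC =====
-- Pre_ excludes exactly the configs with no 'signal_ids' key, on which Python A raises TypeError (iterating None)
def Pre_get_group_index_by_signal_index (signal_index : Int) (config : List (String × List (Int × List Int))) : Prop :=
  "signal_ids" ∈ config.map Prod.fst
instance (signal_index : Int) (config : List (String × List (Int × List Int))) : Decidable (Pre_get_group_index_by_signal_index signal_index config) := by unfold Pre_get_group_index_by_signal_index; infer_instance

def pvWitness_get_group_index_by_signal_index : Int × (List (String × List (Int × List Int))) :=
  (1, [("signal_ids", [(3, [10, 20]), (5, [7])])])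

def Spec_get_group_index_by_signal_index (signal_index : Int) (config : List (String × List (Int × List Int))) (out : Option Int) : Prop := out = get_group_index_by_signal_index_alt signal_index config
instance (signal_index : Int) (config : List (String × List (Int × List Int))) (out : Option Int) : Decidable (Spec_get_group_index_by_signal_index signal_index config out) := by unfold Spec_get_group_index_by_signal_index; infer_instance

-- ===== CLAIM (what is proved, stated in full; the proofs are below) =====
def Claim_equal_get_group_index_by_signal_index : Prop := ∀ (signal_index : Int) (config : List (String × List (Int × List Int))), Dom_get_group_index_by_signal_index signal_index config → Pre_get_group_index_by_signal_index signal_index config → Spec_get_group_index_by_signal_index signal_index config (get_group_index_by_signal_index signal_index config)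

-- ===== LEMMAS AND PROOFS =====

-- reference: index of the first element strictly greater than x (length if none)
def pvFirstGT (x : Int) : List Int → Nat
  | [] => 0
  | v :: vs => if x < v then 0 else pvFirstGT x vs + 1

lemma pvFirstGT_le_length (x : Int) (a : List Int) : pvFirstGT x a ≤ a.length := by
  induction a with
  | nil => simp [pvFirstGT]
  | cons v vs ih => simp [pvFirstGT]; split <;> simp <;> omega

lemma pvFirstGT_before (x : Int) (a : List Int) :
    ∀ j, j < pvFirstGT x a → a.getD j 0 ≤ x := by
  induction a with
  | nil => simp [pvFirstGT]
  | cons v vs ih =>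
    intro j hj
    simp [pvFirstGT] at hj
    split at hj
    · omega
    · rename_i hv
      cases j with
      | zero => simpa using le_of_not_gt hv
      | succ k => simpa using ih k (by omega)

lemma pvFirstGT_at (x : Int) (a : List Int) (h : pvFirstGT x a < a.length) :
    x < a.getD (pvFirstGT x a) 0 := by
  induction a with
  | nil => simp [pvFirstGT] at h
  | cons v vs ih =>
    simp [pvFirstGT] at h ⊢
    split
    · simpa [*]
    · rename_i hv
      simp [hv] at h ⊢
      exact ih (by omega)

def pvMono (a : List Int) : Prop :=
  ∀ i j, i ≤ j → j < a.length → a.getD i 0 ≤ a.getD j 0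

lemma pvPrefix_length (c : Int) (l : List Int) : (pvPrefix c l).length = l.length := by
  induction l generalizing c with
  | nil => simp [pvPrefix]
  | cons n ns ih => simp [pvPrefix, ih]

lemma pvPrefix_lb (l : List Int) (c : Int) (hnn : ∀ v ∈ l, 0 ≤ v) :
    ∀ k, k < (pvPrefix c l).length → c ≤ (pvPrefix c l).getD k 0 := by
  induction l generalizing c with
  | nil => simp [pvPrefix]
  | cons n ns ih =>
    intro k hk
    have hn : 0 ≤ n := hnn n (by simp)
    cases k with
    | zero => simp [pvPrefix]; omega
    | succ m =>
      have hk' : m < (pvPrefix (c + n) ns).length := by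
        simp [pvPrefix, pvPrefix_length] at hk ⊢; omega
      have h2 := ih (c + n) (fun v hv => hnn v (by simp [hv])) m hk'
      have hg : (pvPrefix c (n :: ns)).getD (m + 1) 0 = (pvPrefix (c + n) ns).getD m 0 := by
        simp [pvPrefix]
      rw [hg]; omega

lemma pvPrefix_mono (l : List Int) (c : Int) (hnn : ∀ v ∈ l, 0 ≤ v) :
    pvMono (pvPrefix c l) := by
  induction l generalizing c with
  | nil => intro i j _ hj; simp [pvPrefix] at hj
  | cons n ns ih =>
    intro i j hij hj
    simp [pvPrefix] at hj ⊢
    cases j with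
    | zero =>
      interval_cases i
      simp [pvPrefix]
    | succ m =>
      cases i with
      | zero =>
        simp [pvPrefix, pvPrefix_length] at hj ⊢
        exact pvPrefix_lb ns (c + n) (fun v hv => hnn v (by simp [hv])) m
          (by simp [pvPrefix_length]; omega)
      | succ i' =>
        simp [pvPrefix, pvPrefix_length] at hj ⊢
        exact ih (c + n) (fun v hv => hnn v (by simp [hv])) i' m (by omega)
          (by simp [pvPrefix_length]; omega)

-- binary search computes the first strictly-greater index, given the bracketing invariants
lemma pvBisectRight_eq (a : List Int) (x : Int) (hm : pvMono a) :
    ∀ n lo hi, hi - lo ≤ n → lo ≤ pvFirstGT x a → pvFirstGT x a ≤ hi → hi ≤ a.length →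
      pvBisectRight a x lo hi = pvFirstGT x a := by
  intro n
  induction n with
  | zero =>
    intro lo hi h1 h2 h3 _
    have hle : hi ≤ lo := by omega
    rw [pvBisectRight]
    simp [Nat.not_lt.mpr hle]
    omega
  | succ m ih =>
    intro lo hi h1 h2 h3 h4
    rw [pvBisectRight]
    by_cases hlt : lo < hi
    · simp only [hlt, if_true]
      set mid := (lo + hi) / 2 with hmid
      have hmlo : lo ≤ mid := by omega
      have hmhi : mid < hi := by omega
      by_cases hx : x < a.getD mid 0
      · simp only [hx, if_true]
        have hfle : pvFirstGT x a ≤ mid := by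
          by_contra hc
          have := pvFirstGT_before x a mid (by omega)
          omega
        exact ih lo mid (by omega) h2 hfle (by omega)
      · simp only [hx, if_false]
        have hfge : mid + 1 ≤ pvFirstGT x a := by
          by_contra hc
          have hflt : pvFirstGT x a ≤ mid := by omega
          have hfl : pvFirstGT x a < a.length := by omega
          have h5 := pvFirstGT_at x a hfl
          have h6 := hm (pvFirstGT x a) mid hflt (by omega)
          omega
        exact ih (mid + 1) hi (by omega) hfge h3 h4
    · simp only [hlt, if_false]
      omega

-- A's loop returns the (key-1) at position pvFirstGT of the cumulative sums
lemma pvGoA_eq (sids : List (Int × List Int)) (si : Int) :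
    ∀ (L : List (Int × List Int)) (c : Int),
      pvGoA sids si c L =
        (let lens := L.map (fun p => (((sids.lookup p.1).getD []).length : Int));
         let i := pvFirstGT si (pvPrefix c lens);
         if i < L.length then some ((L.map Prod.fst).getD i 0 - 1) else none) := by
  intro L
  induction L with
  | nil => intro c; simp [pvGoA, pvPrefix, pvFirstGT]
  | cons p rest ih =>
    intro c
    obtain ⟨key, v⟩ := p
    simp only [pvGoA, List.map_cons, pvPrefix, pvFirstGT]
    by_cases hx : si < c + (((sids.lookup key).getD []).length : Int)
    · simp [hx, gt_iff_lt]
    · simp only [gt_iff_lt, hx, if_false, if_neg hx]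
      rw [ih (c + (((sids.lookup key).getD []).length : Int))]
      simp only [List.length_cons]
      by_cases hlt : pvFirstGT si (pvPrefix (c + (((sids.lookup key).getD []).length : Int))
          (rest.map (fun p => (((sids.lookup p.1).getD []).length : Int)))) < rest.length
      · simp [hlt]
      · simp [hlt]

lemma pvLens_eq (sids : List (Int × List Int)) :
    (sids.map Prod.fst).map (fun k => (((sids.lookup k).getD []).length : Int))
      = sids.map (fun p => (((sids.lookup p.1).getD []).length : Int)) := by
  rw [List.map_map]; rfl

-- ===== VERDICT (by name: the statement is the Claim_ definition above) =====
theorem get_group_index_by_signal_index_spec : Claim_equal_get_group_index_by_signal_index := by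
  intro si config _ _
  unfold Spec_get_group_index_by_signal_index
  unfold get_group_index_by_signal_index get_group_index_by_signal_index_alt
  set sids := (config.lookup "signal_ids").getD [] with hsids
  simp only []
  rw [pvGoA_eq sids si sids 0, pvLens_eq]
  set lens := sids.map (fun p => (((sids.lookup p.1).getD []).length : Int)) with hlens
  have hnn : ∀ v ∈ lens, 0 ≤ v := by
    intro v hv
    rw [hlens] at hv
    simp at hv
    obtain ⟨a, b, _, hval⟩ := hv
    omega
  have hmono := pvPrefix_mono lens 0 hnn
  have hfle : pvFirstGT si (pvPrefix 0 lens) ≤ (pvPrefix 0 lens).length :=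
    pvFirstGT_le_length si _
  rw [pvBisectRight_eq (pvPrefix 0 lens) si hmono ((pvPrefix 0 lens).length) 0
    (pvPrefix 0 lens).length (by omega) (by omega) hfle (le_refl _)]
  have hlen : (pvPrefix 0 lens).length = sids.length := by
    rw [pvPrefix_length, hlens, List.length_map]
  simp only []
  by_cases hc : pvFirstGT si (pvPrefix 0 lens) < sids.length
  · have hne : ¬ pvFirstGT si (pvPrefix 0 lens) = sids.length := by omega
    simp [hc, hne]
  · have heq : pvFirstGT si (pvPrefix 0 lens) = sids.length := by omega
    simp [hc, heq]
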